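-- pv_equiv track=rewrite | github.com/Kostis-S-Z/lonelymachine | data/StreetView_API/generate_loc.py | generate_coordinates
-- ===== SOURCE A (Python) =====
-- def generate_coordinates(lats, lons):
--     locs = {'Address': [], 'City': [], 'Country': [], 'lat': [], 'long': []}
--     for lat in lats:
--         for lon in lons:
--             lat_i = str(lat)
--             lon_i = str(lon)
--             lat_i = lat_i[:2] + '.' + lat_i[2:]
--             lon_i = lon_i[:2] + '.' + lon_i[2:]
--             locs['Address'].append('-')
--             locs['City'].append('-')
--             locs['Country'].append('-')
--             locs['lat'].append(lat_i)
--             locs['long'].append(lon_i)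
--     return locs
-- ===== SOURCE B (Python) =====
-- def generate_coordinates(lats, lons):
--     # Single flat loop over row indices: row k of the cartesian product is
--     # (lats[k // m], lons[k % m]) — index arithmetic replaces nested loops.
--     m = len(lons)
--     n = len(lats) * m
--     address, lat_col, lon_col = [], [], []
--     for k in range(n):
--         lat_s = str(lats[k // m])
--         lon_s = str(lons[k % m])
--         address.append('-')
--         lat_col.append(lat_s[:2] + '.' + lat_s[2:])
--         lon_col.append(lon_s[:2] + '.' + lon_s[2:])
--     return {'Address': address,
--             'City': list(address),
--             'Country': list(address),
--             'lat': lat_col,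
--             'long': lon_col}
-- ===== Notes on version B (the rewrite author's own statement) =====
-- stated objective: alternative
-- what changed: Replaces A's nested for-loops with a single flat loop over row indices k in range(len(lats)*len(lons)), recovering each row by index arithmetic (lats[k // m], lons[k % m]).
import Mathlib
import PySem

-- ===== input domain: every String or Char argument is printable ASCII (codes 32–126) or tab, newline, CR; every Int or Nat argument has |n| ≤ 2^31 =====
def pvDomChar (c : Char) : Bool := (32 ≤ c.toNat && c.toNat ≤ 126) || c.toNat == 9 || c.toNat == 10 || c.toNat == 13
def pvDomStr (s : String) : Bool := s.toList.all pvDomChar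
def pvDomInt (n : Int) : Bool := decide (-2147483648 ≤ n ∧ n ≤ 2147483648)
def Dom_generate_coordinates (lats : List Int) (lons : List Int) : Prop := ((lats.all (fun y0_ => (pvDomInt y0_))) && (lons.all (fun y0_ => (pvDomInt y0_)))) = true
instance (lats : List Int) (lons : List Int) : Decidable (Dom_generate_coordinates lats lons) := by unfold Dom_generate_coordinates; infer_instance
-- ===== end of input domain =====

-- ===== PORT A =====
-- B replaces A's nested loops by ONE flat loop over row indices k < |lats|*|lons|,
-- recovering each row by index arithmetic (lats[k // m], lons[k % m]); same cost.

-- str(x)[:2] + '.' + str(x)[2:]  (the formatting both Pythons perform)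
def fmtCoord (x : Int) : String :=
  let s := PySem.Int.toChars x
  String.ofList (PySem.List.slice s none (some 2) ++ ['.'] ++ PySem.List.slice s (some 2) none)

-- state: (Address, City, Country, lat, long), appended to exactly as A appends
def stepA (lat : Int) (acc : List String × List String × List String × List String × List String)
    (lon : Int) : List String × List String × List String × List String × List String :=
  (acc.1 ++ ["-"], acc.2.1 ++ ["-"], acc.2.2.1 ++ ["-"],
   acc.2.2.2.1 ++ [fmtCoord lat], acc.2.2.2.2 ++ [fmtCoord lon])

def generate_coordinates (lats : List Int) (lons : List Int) : List (String × List String) :=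
  let s := lats.foldl (fun acc lat => lons.foldl (stepA lat) acc) ([], [], [], [], [])
  [("Address", s.1), ("City", s.2.1), ("Country", s.2.2.1), ("lat", s.2.2.2.1), ("long", s.2.2.2.2)]

-- ===== PORT B =====
-- body of B's flat loop: k is the row index; lats[k // m] / lons[k % m] are always
-- in range (k < len(lats)*m), so pyGetD's default is never used
def stepB (lats : List Int) (lons : List Int) (m : Int)
    (acc : List String × List String × List String) (k : Int) :
    List String × List String × List String :=
  (acc.1 ++ ["-"],
   acc.2.1 ++ [fmtCoord (PySem.List.pyGetD lats (PySem.Int.floordiv k m) 0)],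
   acc.2.2 ++ [fmtCoord (PySem.List.pyGetD lons (PySem.Int.mod k m) 0)])

def generate_coordinates_alt (lats : List Int) (lons : List Int) : List (String × List String) :=
  let m : Int := lons.length
  let n : Int := lats.length * m
  let cols := (PySem.List.pyRange 0 n 1).foldl (stepB lats lons m) ([], [], [])
  [("Address", cols.1), ("City", cols.1), ("Country", cols.1),
   ("lat", cols.2.1), ("long", cols.2.2)]

-- ===== PRECONDITION & SPEC =====
def Spec_generate_coordinates (lats : List Int) (lons : List Int) (out : List (String × List String)) : Prop := out = generate_coordinates_alt lats lons
instance (lats : List Int) (lons : List Int) (out : List (String × List String)) : Decidable (Spec_generate_coordinates lats lons out) := by unfold Spec_generate_coordinates; infer_instance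

-- ===== CLAIM =====
def Claim_equal_generate_coordinates : Prop := ∀ (lats : List Int) (lons : List Int), Dom_generate_coordinates lats lons → Spec_generate_coordinates lats lons (generate_coordinates lats lons)

-- ===== LEMMAS AND PROOFS =====
-- one pass of A's inner loop appends one block of each column
theorem foldl_stepA (lat : Int) (lons : List Int)
    (acc : List String × List String × List String × List String × List String) :
    lons.foldl (stepA lat) acc =
      (acc.1 ++ List.replicate lons.length "-",
       acc.2.1 ++ List.replicate lons.length "-",
       acc.2.2.1 ++ List.replicate lons.length "-",
       acc.2.2.2.1 ++ List.replicate lons.length (fmtCoord lat),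
       acc.2.2.2.2 ++ lons.map fmtCoord) := by
  induction lons generalizing acc with
  | nil => simp
  | cons x xs ih => simp [List.foldl_cons, ih, stepA, List.replicate_succ]

-- A's outer loop, with an arbitrary starting accumulator
theorem foldl_outer (lats lons : List Int)
    (acc : List String × List String × List String × List String × List String) :
    lats.foldl (fun a lat => lons.foldl (stepA lat) a) acc =
      (acc.1 ++ List.replicate (lats.length * lons.length) "-",
       acc.2.1 ++ List.replicate (lats.length * lons.length) "-",
       acc.2.2.1 ++ List.replicate (lats.length * lons.length) "-",
       acc.2.2.2.1 ++ lats.flatMap (fun l => List.replicate lons.length (fmtCoord l)),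
       acc.2.2.2.2 ++ (List.replicate lats.length (lons.map fmtCoord)).flatten) := by
  induction lats generalizing acc with
  | nil => simp
  | cons l ls ih =>
      have hm : (l :: ls).length * lons.length = lons.length + ls.length * lons.length := by
        simp [Nat.succ_mul, Nat.add_comm]
      rw [List.foldl_cons, foldl_stepA, ih, hm, List.replicate_add]
      simp [List.replicate_succ, List.append_assoc]

-- B's flat loop appends three maps over the index list
theorem foldl_stepB (lats lons : List Int) (m : Int) (l : List Int)
    (acc : List String × List String × List String) :
    l.foldl (stepB lats lons m) acc =
      (acc.1 ++ l.map (fun _ => "-"),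
       acc.2.1 ++ l.map (fun k => fmtCoord (PySem.List.pyGetD lats (PySem.Int.floordiv k m) 0)),
       acc.2.2 ++ l.map (fun k => fmtCoord (PySem.List.pyGetD lons (PySem.Int.mod k m) 0))) := by
  induction l generalizing acc with
  | nil => simp
  | cons x xs ih => simp [List.foldl_cons, ih, stepB]

-- index arithmetic: mapping (k/m, k%m) over range (a*m) is the cartesian double loop
theorem range_mul_map {α : Type} (a m : Nat) (f : Nat → Nat → α) :
    (List.range (a * m)).map (fun k => f (k / m) (k % m)) =
      (List.range a).flatMap (fun i => (List.range m).map (fun j => f i j)) := by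
  induction a with
  | zero => simp
  | succ a ih =>
      have h : (a + 1) * m = a * m + m := by ring
      rw [h, List.range_add, List.map_append, ih, List.range_succ, List.flatMap_append]
      congr 1
      simp only [List.map_map, List.flatMap_singleton]
      apply List.map_congr_left
      intro j hj
      have hjm : j < m := List.mem_range.mp hj
      have hm : 0 < m := Nat.lt_of_le_of_lt (Nat.zero_le j) hjm
      have h1 : (a * m + j) / m = a := by
        rw [Nat.add_comm, Nat.mul_comm, Nat.add_mul_div_left j a hm, Nat.div_eq_of_lt hjm]
        omega
      have h2 : (a * m + j) % m = j := by
        rw [Nat.add_comm, Nat.mul_comm, Nat.add_mul_mod_self_left, Nat.mod_eq_of_lt hjm]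
      simp [Function.comp, h1, h2]

-- reading every index of a list back gives the list
theorem map_range_getD {α : Type} (xs : List α) (d : α) :
    (List.range xs.length).map (fun i => xs.getD i d) = xs := by
  apply List.ext_getElem
  · simp
  · intro i h1 h2
    simp [List.getD_eq_getElem?_getD, List.getElem?_eq_getElem h2]

-- reading back through indices commutes with map / flatMap
theorem map_range_getD_comp {α β : Type} (xs : List α) (d : α) (g : α → β) :
    (List.range xs.length).map (fun i => g (xs.getD i d)) = xs.map g := by
  conv_rhs => rw [← map_range_getD xs d]
  rw [List.map_map]
  rfl

theorem flatMap_range_getD {α β : Type} (xs : List α) (d : α) (F : α → List β) :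
    (List.range xs.length).flatMap (fun i => F (xs.getD i d)) = xs.flatMap F := by
  conv_rhs => rw [← map_range_getD xs d]
  rw [List.flatMap_map]

theorem generate_coordinates_spec : Claim_equal_generate_coordinates := by
  intro lats lons _
  unfold Spec_generate_coordinates generate_coordinates generate_coordinates_alt
  dsimp only
  rw [foldl_outer]
  have hn : ((lats.length : Int) * (lons.length : Int)) = ((lats.length * lons.length : Nat) : Int) := by
    push_cast; ring
  rw [hn, PySem.List.pyRange_one, foldl_stepB]
  simp only [List.map_map, List.nil_append]
  have hcomp : ∀ (g : Int → String),
      (List.range ((((lats.length * lons.length : Nat) : Int)) - 0).toNat).map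
        ((fun k => g k) ∘ fun (k : Nat) => (0 : Int) + k) =
      (List.range (lats.length * lons.length)).map (fun k : Nat => g k) := by
    intro g
    have ht : ((((lats.length * lons.length : Nat) : Int)) - 0).toNat
        = lats.length * lons.length := by rw [sub_zero, Int.toNat_natCast]
    rw [ht]
    apply List.map_congr_left
    intro k _
    simp [Function.comp]
  rw [hcomp, hcomp, hcomp]
  have hget : ∀ k : Nat,
      (fmtCoord (PySem.List.pyGetD lats (PySem.Int.floordiv (k : Int) (lons.length : Int)) 0),
       fmtCoord (PySem.List.pyGetD lons (PySem.Int.mod (k : Int) (lons.length : Int)) 0)) =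
      (fmtCoord (lats.getD (k / lons.length) 0), fmtCoord (lons.getD (k % lons.length) 0)) := by
    intro k
    rw [PySem.Int.floordiv_natCast, PySem.Int.mod_natCast,
        PySem.List.pyGetD_natCast, PySem.List.pyGetD_natCast]
  have hlat : (List.range (lats.length * lons.length)).map
        (fun k : Nat => fmtCoord (PySem.List.pyGetD lats (PySem.Int.floordiv (k : Int) (lons.length : Int)) 0)) =
      lats.flatMap (fun l => List.replicate lons.length (fmtCoord l)) := by
    calc (List.range (lats.length * lons.length)).map
          (fun k : Nat => fmtCoord (PySem.List.pyGetD lats (PySem.Int.floordiv (k : Int) (lons.length : Int)) 0))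
        = (List.range (lats.length * lons.length)).map
          (fun k : Nat => fmtCoord (lats.getD (k / lons.length) 0)) := by
          apply List.map_congr_left; intro k _; exact congrArg Prod.fst (hget k)
      _ = (List.range lats.length).flatMap
          (fun i => (List.range lons.length).map (fun _ => fmtCoord (lats.getD i 0))) :=
          range_mul_map lats.length lons.length (fun i _ => fmtCoord (lats.getD i 0))
      _ = (List.range lats.length).flatMap
          (fun i => List.replicate lons.length (fmtCoord (lats.getD i 0))) := by
          simp [List.map_const']
      _ = lats.flatMap (fun l => List.replicate lons.length (fmtCoord l)) :=
          flatMap_range_getD lats 0 (fun l => List.replicate lons.length (fmtCoord l))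
  have hlon : (List.range (lats.length * lons.length)).map
        (fun k : Nat => fmtCoord (PySem.List.pyGetD lons (PySem.Int.mod (k : Int) (lons.length : Int)) 0)) =
      (List.replicate lats.length (lons.map fmtCoord)).flatten := by
    calc (List.range (lats.length * lons.length)).map
          (fun k : Nat => fmtCoord (PySem.List.pyGetD lons (PySem.Int.mod (k : Int) (lons.length : Int)) 0))
        = (List.range (lats.length * lons.length)).map
          (fun k : Nat => fmtCoord (lons.getD (k % lons.length) 0)) := by
          apply List.map_congr_left; intro k _; exact congrArg Prod.snd (hget k)
      _ = (List.range lats.length).flatMap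
          (fun _ => (List.range lons.length).map (fun j => fmtCoord (lons.getD j 0))) :=
          range_mul_map lats.length lons.length (fun _ j => fmtCoord (lons.getD j 0))
      _ = (List.range lats.length).flatMap (fun _ => lons.map fmtCoord) := by
          simp only [map_range_getD_comp lons 0 fmtCoord]
      _ = (List.replicate lats.length (lons.map fmtCoord)).flatten := by
          simp [List.flatMap_def, List.map_const']
  rw [hlat, hlon]
  simp [List.map_const']
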